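-- pv_equiv track=rewrite | github.com/colinjturney/wiz-api-projects-rbac | create_projects_adgroups_csv.py | build_entity_lineage
-- ===== SOURCE A (Python) =====
-- azure_entity_matrix= [
--     {"index": 0, "entity_type": "cloud_organization", "parent_index": None},
--     {"index": 1, "entity_type": "cloud_organization", "parent_index": 0},
--     {"index": 2, "entity_type": "subscription", "parent_index": 1},
--     {"index": 3, "entity_type": "cloud_organization", "parent_index": 1},
--     {"index": 4, "entity_type": "subscription", "parent_index": 3},
--     {"index": 5, "entity_type": "cloud_organization", "parent_index": 3},
--     {"index": 6, "entity_type": "subscription", "parent_index": 5},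
--     {"index": 7, "entity_type": "cloud_organization", "parent_index": 5},
--     {"index": 8, "entity_type": "cloud_organization", "parent_index": 7},
--     {"index": 9, "entity_type": "cloud_organization", "parent_index": 8},
--     {"index": 10, "entity_type": "subscription", "parent_index": 9},
--     {"index": 11, "entity_type": "subscription", "parent_index": 8},
--     {"index": 12, "entity_type": "subscription", "parent_index": 7},
--     {"index": 13, "entity_type": "subscription", "parent_index": 0},
-- ]
--
-- aws_entity_matrix = [
--     {"index": 0, "entity_type": "cloud_organization", "parent_index": None},
--     {"index": 1, "entity_type": "cloud_organization", "parent_index": 0},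
--     {"index": 2, "entity_type": "subscription", "parent_index": 1},
--     {"index": 3, "entity_type": "cloud_organization", "parent_index": 1},
--     {"index": 4, "entity_type": "subscription", "parent_index": 3},
--     {"index": 5, "entity_type": "cloud_organization", "parent_index": 3},
--     {"index": 6, "entity_type": "subscription", "parent_index": 5},
--     {"index": 7, "entity_type": "cloud_organization", "parent_index": 5},
--     {"index": 8, "entity_type": "cloud_organization", "parent_index": 7},
--     {"index": 9, "entity_type": "cloud_organization", "parent_index": 8},
--     {"index": 10, "entity_type": "subscription", "parent_index": 9},
--     {"index": 11, "entity_type": "subscription", "parent_index": 8},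
--     {"index": 12, "entity_type": "subscription", "parent_index": 7},
--     {"index": 13, "entity_type": "subscription", "parent_index": 0},
-- ]
--
-- gcp_entity_matrix = [
--     {"index": 0, "entity_type": "cloud_organization", "parent_index": None},
--     {"index": 1, "entity_type": "cloud_organization", "parent_index": 0},
--     {"index": 2, "entity_type": "subscription", "parent_index": 1},
--     {"index": 3, "entity_type": "cloud_organization", "parent_index": 1},
--     {"index": 4, "entity_type": "subscription", "parent_index": 3},
--     {"index": 5, "entity_type": "cloud_organization", "parent_index": 3},
--     {"index": 6, "entity_type": "subscription", "parent_index": 5},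
--     {"index": 7, "entity_type": "cloud_organization", "parent_index": 5},
--     {"index": 8, "entity_type": "subscription", "parent_index": 7},
--     {"index": 9, "entity_type": "subscription", "parent_index": 0},
-- ]
--
-- def get_matrix(cloud):
--     if cloud == "Azure":
--         return azure_entity_matrix
--     elif cloud == "AWS":
--         return aws_entity_matrix
--     elif cloud == "GCP":
--         return gcp_entity_matrix
--
-- def get_entity_lineage_matrix(cloud, target_index, result_list):
--
--     matrix = get_matrix(cloud)
--
--     if result_list == None:
--
--         result_list = [target_index]
--
--     if target_index == 0:
--         return result_list
--
--     for entity in matrix: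
--         if entity["index"] == target_index:
--             return get_entity_lineage_matrix(cloud, entity["parent_index"], [entity["parent_index"]] + result_list)
--
-- def build_entity_lineage(cloud, entity_index, entities, mg_friendly_name):
--
--     entity_lineage_matrix = get_entity_lineage_matrix(cloud, entity_index, None)
--     entity_name_lineage_list = []
--
--     for entry in entity_lineage_matrix:
--         if entity_lineage_matrix.index(entry) == 0:
--             name = mg_friendly_name
--         else:
--             if entities[entry]["name"].find("/") != -1:
--                 name = entities[entry]["name"].replace("/","-")
--             else:
--                 name = entities[entry]["name"]
--
--         entity_name_lineage_list = entity_name_lineage_list + [name]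
--
--     return entity_name_lineage_list
-- ===== SOURCE B (Python) =====
-- azure_entity_matrix = [
--     {"index": 0, "entity_type": "cloud_organization", "parent_index": None},
--     {"index": 1, "entity_type": "cloud_organization", "parent_index": 0},
--     {"index": 2, "entity_type": "subscription", "parent_index": 1},
--     {"index": 3, "entity_type": "cloud_organization", "parent_index": 1},
--     {"index": 4, "entity_type": "subscription", "parent_index": 3},
--     {"index": 5, "entity_type": "cloud_organization", "parent_index": 3},
--     {"index": 6, "entity_type": "subscription", "parent_index": 5},
--     {"index": 7, "entity_type": "cloud_organization", "parent_index": 5},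
--     {"index": 8, "entity_type": "cloud_organization", "parent_index": 7},
--     {"index": 9, "entity_type": "cloud_organization", "parent_index": 8},
--     {"index": 10, "entity_type": "subscription", "parent_index": 9},
--     {"index": 11, "entity_type": "subscription", "parent_index": 8},
--     {"index": 12, "entity_type": "subscription", "parent_index": 7},
--     {"index": 13, "entity_type": "subscription", "parent_index": 0},
-- ]
--
-- aws_entity_matrix = [dict(e) for e in azure_entity_matrix]
--
-- gcp_entity_matrix = [
--     {"index": 0, "entity_type": "cloud_organization", "parent_index": None},
--     {"index": 1, "entity_type": "cloud_organization", "parent_index": 0},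
--     {"index": 2, "entity_type": "subscription", "parent_index": 1},
--     {"index": 3, "entity_type": "cloud_organization", "parent_index": 1},
--     {"index": 4, "entity_type": "subscription", "parent_index": 3},
--     {"index": 5, "entity_type": "cloud_organization", "parent_index": 3},
--     {"index": 6, "entity_type": "subscription", "parent_index": 5},
--     {"index": 7, "entity_type": "cloud_organization", "parent_index": 5},
--     {"index": 8, "entity_type": "subscription", "parent_index": 7},
--     {"index": 9, "entity_type": "subscription", "parent_index": 0},
-- ]
--
--
-- def get_matrix(cloud):
--     if cloud == "Azure":
--         return azure_entity_matrix
--     elif cloud == "AWS":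
--         return aws_entity_matrix
--     elif cloud == "GCP":
--         return gcp_entity_matrix
--
--
-- def build_entity_lineage(cloud, entity_index, entities, mg_friendly_name):
--     # Walk the parent chain iteratively, collecting indices child-to-root
--     # (index 0, the root, is excluded: its position carries mg_friendly_name).
--     chain = []
--     cur = entity_index
--     if cur != 0:
--         parents = {e["index"]: e["parent_index"] for e in get_matrix(cloud)}
--         while cur != 0:
--             chain.append(cur)
--             cur = parents[cur]
--     return [mg_friendly_name] + [entities[i]["name"].replace("/", "-") for i in reversed(chain)]
-- ===== Notes on version B (the rewrite author's own statement) =====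
-- stated objective: simpler
-- what changed: A's recursive get_entity_lineage_matrix (rescanning the matrix per step, then a quadratic .index(entry)==0 positional test in the output loop) is replaced by one parent dictionary built once from the matrix, an iterative child-to-root walk collecting the index chain, and a single reversed comprehension that emits mg_friendly_name followed by the names with an unconditional replace('/','-').
import Mathlib
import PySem

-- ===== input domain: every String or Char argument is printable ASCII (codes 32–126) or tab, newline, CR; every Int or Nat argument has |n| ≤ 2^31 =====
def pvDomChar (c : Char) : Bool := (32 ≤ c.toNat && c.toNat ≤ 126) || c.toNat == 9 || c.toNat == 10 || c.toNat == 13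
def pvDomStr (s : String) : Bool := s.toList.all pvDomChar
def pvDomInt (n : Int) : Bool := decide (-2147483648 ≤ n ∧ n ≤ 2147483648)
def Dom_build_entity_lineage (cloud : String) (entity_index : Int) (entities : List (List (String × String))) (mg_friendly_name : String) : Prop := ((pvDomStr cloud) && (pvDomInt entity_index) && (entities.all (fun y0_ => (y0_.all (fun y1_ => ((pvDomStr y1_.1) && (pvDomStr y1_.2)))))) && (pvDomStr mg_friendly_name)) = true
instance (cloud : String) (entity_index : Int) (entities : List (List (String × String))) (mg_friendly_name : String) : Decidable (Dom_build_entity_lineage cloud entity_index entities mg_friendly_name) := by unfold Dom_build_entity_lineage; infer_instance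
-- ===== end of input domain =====

-- B replaces A's recursive matrix-rescanning lineage builder (with its quadratic `.index(entry) == 0`
-- positional test) by an iterative walk over a parent dictionary built once, collecting the index
-- chain child-to-root and emitting the names with one reversed comprehension (objective: simpler).

-- ===== PORT A =====
-- Each matrix row {"index": i, "entity_type": t, "parent_index": p} is ported as the triple (i, t, p).
def azure_entity_matrix : List (Int × String × Option Int) :=
  [(0, "cloud_organization", none), (1, "cloud_organization", some 0), (2, "subscription", some 1),
   (3, "cloud_organization", some 1), (4, "subscription", some 3), (5, "cloud_organization", some 3),
   (6, "subscription", some 5), (7, "cloud_organization", some 5), (8, "cloud_organization", some 7),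
   (9, "cloud_organization", some 8), (10, "subscription", some 9), (11, "subscription", some 8),
   (12, "subscription", some 7), (13, "subscription", some 0)]

def aws_entity_matrix : List (Int × String × Option Int) :=
  [(0, "cloud_organization", none), (1, "cloud_organization", some 0), (2, "subscription", some 1),
   (3, "cloud_organization", some 1), (4, "subscription", some 3), (5, "cloud_organization", some 3),
   (6, "subscription", some 5), (7, "cloud_organization", some 5), (8, "cloud_organization", some 7),
   (9, "cloud_organization", some 8), (10, "subscription", some 9), (11, "subscription", some 8),
   (12, "subscription", some 7), (13, "subscription", some 0)]

def gcp_entity_matrix : List (Int × String × Option Int) :=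
  [(0, "cloud_organization", none), (1, "cloud_organization", some 0), (2, "subscription", some 1),
   (3, "cloud_organization", some 1), (4, "subscription", some 3), (5, "cloud_organization", some 3),
   (6, "subscription", some 5), (7, "cloud_organization", some 5), (8, "subscription", some 7),
   (9, "subscription", some 0)]

def get_matrix (cloud : String) : Option (List (Int × String × Option Int)) :=
  if cloud = "Azure" then some azure_entity_matrix
  else if cloud = "AWS" then some aws_entity_matrix
  else if cloud = "GCP" then some gcp_entity_matrix
  else none

-- A's `for entity in matrix: if entity["index"] == target_index: return <recursive call on parent>`:
-- the scan yields the first matching entity's parent (none = loop fell through, the function returns None).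
def geLM_scan (target : Int) : List (Int × String × Option Int) → Option (Option Int)
  | [] => none
  | e :: rest => if e.1 = target then some e.2.2 else geLM_scan target rest

-- get_entity_lineage_matrix. `none` = Python returned None OR raised (matrix None ⇒ TypeError; both
-- excluded by Pre_). The fuel is a totality guard only: every parent chain of the fixed matrices has
-- length ≤ 14, so fuel 20 is never exhausted. A parent of `none` is Python recursing with
-- target=None, which matches no entity index and returns None.
def geLM : Nat → String → Int → Option (List Int) → Option (List Int)
  | 0, _, _, _ => none
  | fuel + 1, cloud, target, result_list =>
    let rl := result_list.getD [target]
    if target = 0 then some rl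
    else
      match get_matrix cloud with
      | none => none
      | some m =>
        match geLM_scan target m with
        | none => none
        | some (some p) => geLM fuel cloud p (some (p :: rl))
        | some none => none

-- entry["name"]: first-match association-list lookup (Python dict lookup).
def pyDictGetName (d : List (String × String)) : Option String :=
  (d.find? (fun kv => kv.1 = "name")).map (·.2)

-- The `.getD []` / `.getD ""` defaults stand where Python raises IndexError / KeyError — both excluded by Pre_.
def build_entity_lineage (cloud : String) (entity_index : Int) (entities : List (List (String × String))) (mg_friendly_name : String) : List String :=
  match geLM 20 cloud entity_index none with
  | none => []
  | some elm =>
    elm.foldl (fun acc entry =>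
      let name :=
        if PySem.List.index? elm entry = some 0 then mg_friendly_name
        else
          let nm := (pyDictGetName ((PySem.List.pyGet? entities entry).getD [])).getD ""
          if PySem.Str.find nm "/" ≠ -1 then PySem.Str.replace nm "/" "-" else nm
      acc ++ [name]) []

-- ===== PORT B =====
-- {e["index"]: e["parent_index"] for e in get_matrix(cloud)}
def b_parents (m : List (Int × String × Option Int)) : PySem.Dict Int (Option Int) :=
  m.foldl (fun d e => d.insert e.1 e.2.2) PySem.Dict.empty

-- the while loop: collect the chain child-to-root; `none` = Python raised (KeyError on a missing
-- index, or TypeError after cur became None). Fuel 20 is a totality guard only (chains ≤ 14).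
def b_chain : Nat → PySem.Dict Int (Option Int) → Int → List Int → Option (List Int)
  | 0, _, _, _ => none
  | fuel + 1, parents, cur, chain =>
    if cur = 0 then some chain
    else
      match parents.get? cur with
      | none => none
      | some none => none
      | some (some p) => b_chain fuel parents p (chain ++ [cur])

def build_entity_lineage_alt (cloud : String) (entity_index : Int) (entities : List (List (String × String))) (mg_friendly_name : String) : List String :=
  let chain? :=
    if entity_index ≠ 0 then
      match get_matrix cloud with
      | none => none  -- Python: TypeError iterating None; excluded by Pre_
      | some m => b_chain 20 (b_parents m) entity_index []
    else some []
  match chain? with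
  | none => []  -- Python raised; excluded by Pre_
  | some chain =>
    [mg_friendly_name] ++ chain.reverse.map (fun i =>
      PySem.Str.replace ((pyDictGetName ((PySem.List.pyGet? entities i).getD [])).getD "") "/" "-")

-- ===== PRECONDITION & SPEC =====
-- Literal lineage tables of the fixed matrices: linAz/linG i = the root-first index chain of i
-- (Azure and AWS share one matrix), none where i has no chain.
def linAz (i : Int) : Option (List Int) :=
  if i = 0 then some [0]
  else if i = 1 then some [0, 1]
  else if i = 2 then some [0, 1, 2]
  else if i = 3 then some [0, 1, 3]
  else if i = 4 then some [0, 1, 3, 4]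
  else if i = 5 then some [0, 1, 3, 5]
  else if i = 6 then some [0, 1, 3, 5, 6]
  else if i = 7 then some [0, 1, 3, 5, 7]
  else if i = 8 then some [0, 1, 3, 5, 7, 8]
  else if i = 9 then some [0, 1, 3, 5, 7, 8, 9]
  else if i = 10 then some [0, 1, 3, 5, 7, 8, 9, 10]
  else if i = 11 then some [0, 1, 3, 5, 7, 8, 11]
  else if i = 12 then some [0, 1, 3, 5, 7, 12]
  else if i = 13 then some [0, 13]
  else none

def linG (i : Int) : Option (List Int) :=
  if i = 0 then some [0]
  else if i = 1 then some [0, 1]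
  else if i = 2 then some [0, 1, 2]
  else if i = 3 then some [0, 1, 3]
  else if i = 4 then some [0, 1, 3, 4]
  else if i = 5 then some [0, 1, 3, 5]
  else if i = 6 then some [0, 1, 3, 5, 6]
  else if i = 7 then some [0, 1, 3, 5, 7]
  else if i = 8 then some [0, 1, 3, 5, 7, 8]
  else if i = 9 then some [0, 9]
  else none

def lin (cloud : String) (i : Int) : Option (List Int) :=
  if cloud = "Azure" ∨ cloud = "AWS" then linAz i
  else if cloud = "GCP" then linG i
  else if i = 0 then some [0] else none

-- Pre_ = exactly the inputs where Python A returns: a lineage exists (else A returns None and the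
-- caller's `for` raises TypeError), and every non-root lineage index is a valid position of
-- `entities` whose dict has a "name" key (else IndexError / KeyError).
def Pre_build_entity_lineage (cloud : String) (entity_index : Int) (entities : List (List (String × String))) (mg_friendly_name : String) : Prop :=
  lin cloud entity_index ≠ none ∧
    ∀ e ∈ (lin cloud entity_index).getD [], e ≠ 0 →
      (PySem.List.pyGet? entities e).isSome ∧
        ((PySem.List.pyGet? entities e).getD []).any (fun kv => kv.1 == "name")
instance (cloud : String) (entity_index : Int) (entities : List (List (String × String))) (mg_friendly_name : String) : Decidable (Pre_build_entity_lineage cloud entity_index entities mg_friendly_name) := by unfold Pre_build_entity_lineage; infer_instance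

def pvWitness_build_entity_lineage : String × Int × (List (List (String × String))) × String :=
  ("Azure", 2, [[("name", "root")], [("name", "alpha")], [("name", "b/c")]], "MG")

def Spec_build_entity_lineage (cloud : String) (entity_index : Int) (entities : List (List (String × String))) (mg_friendly_name : String) (out : List String) : Prop := out = build_entity_lineage_alt cloud entity_index entities mg_friendly_name
instance (cloud : String) (entity_index : Int) (entities : List (List (String × String))) (mg_friendly_name : String) (out : List String) : Decidable (Spec_build_entity_lineage cloud entity_index entities mg_friendly_name out) := by unfold Spec_build_entity_lineage; infer_instance

-- ===== CLAIM (what is proved, stated in full; the proofs are below) =====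
def Claim_equal_build_entity_lineage : Prop := ∀ (cloud : String) (entity_index : Int) (entities : List (List (String × String))) (mg_friendly_name : String), Dom_build_entity_lineage cloud entity_index entities mg_friendly_name → Pre_build_entity_lineage cloud entity_index entities mg_friendly_name → Spec_build_entity_lineage cloud entity_index entities mg_friendly_name (build_entity_lineage cloud entity_index entities mg_friendly_name)

-- ===== LEMMAS AND PROOFS =====
-- str.replace(old, new) leaves a string without an occurrence of old unchanged (old = "/" here):
-- first the inner scanner, then the string-level fact.
theorem go_id (fuel : Nat) (l acc : List Char) (h : '/' ∉ l) (hf : l.length ≤ fuel) :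
    PySem.Chars.replace.go ['/'] ['-'] fuel l acc = acc.reverse ++ l := by
  induction fuel generalizing l acc with
  | zero => simp [PySem.Chars.replace.go]
  | succ n ih =>
    cases l with
    | nil => simp [PySem.Chars.replace.go]
    | cons c t =>
      have hne : c ≠ '/' := fun hcc => h (by simp [hcc])
      have hc : ¬ (['/'].isPrefixOf (c :: t) = true) := by
        simp [List.isPrefixOf]; exact fun hcc => absurd hcc.symm hne
      rw [PySem.Chars.replace.go]
      simp only [if_neg hc]
      rw [ih t (c :: acc) (fun hm => h (List.mem_cons_of_mem _ hm)) (by simpa using Nat.le_of_succ_le_succ (by simpa using hf))]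
      simp

theorem str_replace_noslash (s : String) (h : PySem.Str.find s "/" = -1) :
    PySem.Str.replace s "/" "-" = s := by
  have hmem : '/' ∉ s.toList := fun hm =>
    (PySem.Str.find_eq_neg_one_iff s "/").mp h
      (by simpa using (List.singleton_infix_iff '/' s.toList).mpr hm)
  have hc : PySem.Chars.replace s.toList ['/'] ['-'] = s.toList := by
    unfold PySem.Chars.replace
    rw [if_neg (by simp), go_id s.toList.length s.toList [] hmem (le_refl _)]
    simp
  apply String.toList_inj.mp
  simp [PySem.Str.replace, hc]

-- A's `if name.find("/") != -1 then name.replace("/","-") else name` equals B's unconditional replace.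
theorem name_fix (s : String) (h : PySem.Chars.find s.toList ['/'] = -1) :
    s = PySem.Str.replace s "/" "-" :=
  (str_replace_noslash s (by simpa [PySem.Str.find] using h)).symm

-- target 0 returns its result list without touching the matrix (needed for a symbolic cloud string).
theorem geLM_zero (cloud : String) : geLM 20 cloud 0 none = some [0] := by
  rw [show (20:Nat) = 19+1 from rfl]; simp [geLM]

theorem build_entity_lineage_spec : Claim_equal_build_entity_lineage := by
  intro cloud entity_index entities mg_friendly_name _ hpre
  obtain ⟨hsome, -⟩ := hpre
  unfold Spec_build_entity_lineage
  by_cases hc1 : cloud = "Azure"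
  · subst hc1
    have hl : linAz entity_index ≠ none := by simpa [lin] using hsome
    by_cases h0 : entity_index = 0
    · subst h0
      have hA : geLM 20 "Azure" 0 none = some [0] := by decide
      simp only [build_entity_lineage, build_entity_lineage_alt, get_matrix, hA]
      simp [List.idxOf?, List.findIdx?_cons, List.foldl]
    by_cases h1 : entity_index = 1
    · subst h1
      have hA : geLM 20 "Azure" 1 none = some [0, 1] := by decide
      have hB : b_chain 20 (b_parents azure_entity_matrix) 1 [] = some [1] := by decide
      simp only [build_entity_lineage, build_entity_lineage_alt, get_matrix, hA]
      simp [hB, List.idxOf?, List.findIdx?_cons, List.foldl]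
      exact name_fix _
    by_cases h2 : entity_index = 2
    · subst h2
      have hA : geLM 20 "Azure" 2 none = some [0, 1, 2] := by decide
      have hB : b_chain 20 (b_parents azure_entity_matrix) 2 [] = some [2, 1] := by decide
      simp only [build_entity_lineage, build_entity_lineage_alt, get_matrix, hA]
      simp [hB, List.idxOf?, List.findIdx?_cons, List.foldl]
      repeat' apply And.intro
      all_goals exact name_fix _
    by_cases h3 : entity_index = 3
    · subst h3
      have hA : geLM 20 "Azure" 3 none = some [0, 1, 3] := by decide
      have hB : b_chain 20 (b_parents azure_entity_matrix) 3 [] = some [3, 1] := by decide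
      simp only [build_entity_lineage, build_entity_lineage_alt, get_matrix, hA]
      simp [hB, List.idxOf?, List.findIdx?_cons, List.foldl]
      repeat' apply And.intro
      all_goals exact name_fix _
    by_cases h4 : entity_index = 4
    · subst h4
      have hA : geLM 20 "Azure" 4 none = some [0, 1, 3, 4] := by decide
      have hB : b_chain 20 (b_parents azure_entity_matrix) 4 [] = some [4, 3, 1] := by decide
      simp only [build_entity_lineage, build_entity_lineage_alt, get_matrix, hA]
      simp [hB, List.idxOf?, List.findIdx?_cons, List.foldl]
      repeat' apply And.intro
      all_goals exact name_fix _
    by_cases h5 : entity_index = 5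
    · subst h5
      have hA : geLM 20 "Azure" 5 none = some [0, 1, 3, 5] := by decide
      have hB : b_chain 20 (b_parents azure_entity_matrix) 5 [] = some [5, 3, 1] := by decide
      simp only [build_entity_lineage, build_entity_lineage_alt, get_matrix, hA]
      simp [hB, List.idxOf?, List.findIdx?_cons, List.foldl]
      repeat' apply And.intro
      all_goals exact name_fix _
    by_cases h6 : entity_index = 6
    · subst h6
      have hA : geLM 20 "Azure" 6 none = some [0, 1, 3, 5, 6] := by decide
      have hB : b_chain 20 (b_parents azure_entity_matrix) 6 [] = some [6, 5, 3, 1] := by decide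
      simp only [build_entity_lineage, build_entity_lineage_alt, get_matrix, hA]
      simp [hB, List.idxOf?, List.findIdx?_cons, List.foldl]
      repeat' apply And.intro
      all_goals exact name_fix _
    by_cases h7 : entity_index = 7
    · subst h7
      have hA : geLM 20 "Azure" 7 none = some [0, 1, 3, 5, 7] := by decide
      have hB : b_chain 20 (b_parents azure_entity_matrix) 7 [] = some [7, 5, 3, 1] := by decide
      simp only [build_entity_lineage, build_entity_lineage_alt, get_matrix, hA]
      simp [hB, List.idxOf?, List.findIdx?_cons, List.foldl]
      repeat' apply And.intro
      all_goals exact name_fix _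
    by_cases h8 : entity_index = 8
    · subst h8
      have hA : geLM 20 "Azure" 8 none = some [0, 1, 3, 5, 7, 8] := by decide
      have hB : b_chain 20 (b_parents azure_entity_matrix) 8 [] = some [8, 7, 5, 3, 1] := by decide
      simp only [build_entity_lineage, build_entity_lineage_alt, get_matrix, hA]
      simp [hB, List.idxOf?, List.findIdx?_cons, List.foldl]
      repeat' apply And.intro
      all_goals exact name_fix _
    by_cases h9 : entity_index = 9
    · subst h9
      have hA : geLM 20 "Azure" 9 none = some [0, 1, 3, 5, 7, 8, 9] := by decide
      have hB : b_chain 20 (b_parents azure_entity_matrix) 9 [] = some [9, 8, 7, 5, 3, 1] := by decide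
      simp only [build_entity_lineage, build_entity_lineage_alt, get_matrix, hA]
      simp [hB, List.idxOf?, List.findIdx?_cons, List.foldl]
      repeat' apply And.intro
      all_goals exact name_fix _
    by_cases h10 : entity_index = 10
    · subst h10
      have hA : geLM 20 "Azure" 10 none = some [0, 1, 3, 5, 7, 8, 9, 10] := by decide
      have hB : b_chain 20 (b_parents azure_entity_matrix) 10 [] = some [10, 9, 8, 7, 5, 3, 1] := by decide
      simp only [build_entity_lineage, build_entity_lineage_alt, get_matrix, hA]
      simp [hB, List.idxOf?, List.findIdx?_cons, List.foldl]
      repeat' apply And.intro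
      all_goals exact name_fix _
    by_cases h11 : entity_index = 11
    · subst h11
      have hA : geLM 20 "Azure" 11 none = some [0, 1, 3, 5, 7, 8, 11] := by decide
      have hB : b_chain 20 (b_parents azure_entity_matrix) 11 [] = some [11, 8, 7, 5, 3, 1] := by decide
      simp only [build_entity_lineage, build_entity_lineage_alt, get_matrix, hA]
      simp [hB, List.idxOf?, List.findIdx?_cons, List.foldl]
      repeat' apply And.intro
      all_goals exact name_fix _
    by_cases h12 : entity_index = 12
    · subst h12
      have hA : geLM 20 "Azure" 12 none = some [0, 1, 3, 5, 7, 12] := by decide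
      have hB : b_chain 20 (b_parents azure_entity_matrix) 12 [] = some [12, 7, 5, 3, 1] := by decide
      simp only [build_entity_lineage, build_entity_lineage_alt, get_matrix, hA]
      simp [hB, List.idxOf?, List.findIdx?_cons, List.foldl]
      repeat' apply And.intro
      all_goals exact name_fix _
    by_cases h13 : entity_index = 13
    · subst h13
      have hA : geLM 20 "Azure" 13 none = some [0, 13] := by decide
      have hB : b_chain 20 (b_parents azure_entity_matrix) 13 [] = some [13] := by decide
      simp only [build_entity_lineage, build_entity_lineage_alt, get_matrix, hA]
      simp [hB, List.idxOf?, List.findIdx?_cons, List.foldl]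
      exact name_fix _
    simp [linAz, h0, h1, h2, h3, h4, h5, h6, h7, h8, h9, h10, h11, h12, h13] at hl

  by_cases hc2 : cloud = "AWS"
  · subst hc2
    have hl : linAz entity_index ≠ none := by simpa [lin] using hsome
    by_cases h0 : entity_index = 0
    · subst h0
      have hA : geLM 20 "AWS" 0 none = some [0] := by decide
      simp only [build_entity_lineage, build_entity_lineage_alt, get_matrix, hA]
      simp [List.idxOf?, List.findIdx?_cons, List.foldl]
    by_cases h1 : entity_index = 1
    · subst h1
      have hA : geLM 20 "AWS" 1 none = some [0, 1] := by decide
      have hB : b_chain 20 (b_parents aws_entity_matrix) 1 [] = some [1] := by decide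
      simp only [build_entity_lineage, build_entity_lineage_alt, get_matrix, hA]
      simp [hB, List.idxOf?, List.findIdx?_cons, List.foldl]
      exact name_fix _
    by_cases h2 : entity_index = 2
    · subst h2
      have hA : geLM 20 "AWS" 2 none = some [0, 1, 2] := by decide
      have hB : b_chain 20 (b_parents aws_entity_matrix) 2 [] = some [2, 1] := by decide
      simp only [build_entity_lineage, build_entity_lineage_alt, get_matrix, hA]
      simp [hB, List.idxOf?, List.findIdx?_cons, List.foldl]
      repeat' apply And.intro
      all_goals exact name_fix _
    by_cases h3 : entity_index = 3
    · subst h3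
      have hA : geLM 20 "AWS" 3 none = some [0, 1, 3] := by decide
      have hB : b_chain 20 (b_parents aws_entity_matrix) 3 [] = some [3, 1] := by decide
      simp only [build_entity_lineage, build_entity_lineage_alt, get_matrix, hA]
      simp [hB, List.idxOf?, List.findIdx?_cons, List.foldl]
      repeat' apply And.intro
      all_goals exact name_fix _
    by_cases h4 : entity_index = 4
    · subst h4
      have hA : geLM 20 "AWS" 4 none = some [0, 1, 3, 4] := by decide
      have hB : b_chain 20 (b_parents aws_entity_matrix) 4 [] = some [4, 3, 1] := by decide
      simp only [build_entity_lineage, build_entity_lineage_alt, get_matrix, hA]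
      simp [hB, List.idxOf?, List.findIdx?_cons, List.foldl]
      repeat' apply And.intro
      all_goals exact name_fix _
    by_cases h5 : entity_index = 5
    · subst h5
      have hA : geLM 20 "AWS" 5 none = some [0, 1, 3, 5] := by decide
      have hB : b_chain 20 (b_parents aws_entity_matrix) 5 [] = some [5, 3, 1] := by decide
      simp only [build_entity_lineage, build_entity_lineage_alt, get_matrix, hA]
      simp [hB, List.idxOf?, List.findIdx?_cons, List.foldl]
      repeat' apply And.intro
      all_goals exact name_fix _
    by_cases h6 : entity_index = 6
    · subst h6
      have hA : geLM 20 "AWS" 6 none = some [0, 1, 3, 5, 6] := by decide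
      have hB : b_chain 20 (b_parents aws_entity_matrix) 6 [] = some [6, 5, 3, 1] := by decide
      simp only [build_entity_lineage, build_entity_lineage_alt, get_matrix, hA]
      simp [hB, List.idxOf?, List.findIdx?_cons, List.foldl]
      repeat' apply And.intro
      all_goals exact name_fix _
    by_cases h7 : entity_index = 7
    · subst h7
      have hA : geLM 20 "AWS" 7 none = some [0, 1, 3, 5, 7] := by decide
      have hB : b_chain 20 (b_parents aws_entity_matrix) 7 [] = some [7, 5, 3, 1] := by decide
      simp only [build_entity_lineage, build_entity_lineage_alt, get_matrix, hA]
      simp [hB, List.idxOf?, List.findIdx?_cons, List.foldl]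
      repeat' apply And.intro
      all_goals exact name_fix _
    by_cases h8 : entity_index = 8
    · subst h8
      have hA : geLM 20 "AWS" 8 none = some [0, 1, 3, 5, 7, 8] := by decide
      have hB : b_chain 20 (b_parents aws_entity_matrix) 8 [] = some [8, 7, 5, 3, 1] := by decide
      simp only [build_entity_lineage, build_entity_lineage_alt, get_matrix, hA]
      simp [hB, List.idxOf?, List.findIdx?_cons, List.foldl]
      repeat' apply And.intro
      all_goals exact name_fix _
    by_cases h9 : entity_index = 9
    · subst h9
      have hA : geLM 20 "AWS" 9 none = some [0, 1, 3, 5, 7, 8, 9] := by decide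
      have hB : b_chain 20 (b_parents aws_entity_matrix) 9 [] = some [9, 8, 7, 5, 3, 1] := by decide
      simp only [build_entity_lineage, build_entity_lineage_alt, get_matrix, hA]
      simp [hB, List.idxOf?, List.findIdx?_cons, List.foldl]
      repeat' apply And.intro
      all_goals exact name_fix _
    by_cases h10 : entity_index = 10
    · subst h10
      have hA : geLM 20 "AWS" 10 none = some [0, 1, 3, 5, 7, 8, 9, 10] := by decide
      have hB : b_chain 20 (b_parents aws_entity_matrix) 10 [] = some [10, 9, 8, 7, 5, 3, 1] := by decide
      simp only [build_entity_lineage, build_entity_lineage_alt, get_matrix, hA]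
      simp [hB, List.idxOf?, List.findIdx?_cons, List.foldl]
      repeat' apply And.intro
      all_goals exact name_fix _
    by_cases h11 : entity_index = 11
    · subst h11
      have hA : geLM 20 "AWS" 11 none = some [0, 1, 3, 5, 7, 8, 11] := by decide
      have hB : b_chain 20 (b_parents aws_entity_matrix) 11 [] = some [11, 8, 7, 5, 3, 1] := by decide
      simp only [build_entity_lineage, build_entity_lineage_alt, get_matrix, hA]
      simp [hB, List.idxOf?, List.findIdx?_cons, List.foldl]
      repeat' apply And.intro
      all_goals exact name_fix _
    by_cases h12 : entity_index = 12
    · subst h12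
      have hA : geLM 20 "AWS" 12 none = some [0, 1, 3, 5, 7, 12] := by decide
      have hB : b_chain 20 (b_parents aws_entity_matrix) 12 [] = some [12, 7, 5, 3, 1] := by decide
      simp only [build_entity_lineage, build_entity_lineage_alt, get_matrix, hA]
      simp [hB, List.idxOf?, List.findIdx?_cons, List.foldl]
      repeat' apply And.intro
      all_goals exact name_fix _
    by_cases h13 : entity_index = 13
    · subst h13
      have hA : geLM 20 "AWS" 13 none = some [0, 13] := by decide
      have hB : b_chain 20 (b_parents aws_entity_matrix) 13 [] = some [13] := by decide
      simp only [build_entity_lineage, build_entity_lineage_alt, get_matrix, hA]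
      simp [hB, List.idxOf?, List.findIdx?_cons, List.foldl]
      exact name_fix _
    simp [linAz, h0, h1, h2, h3, h4, h5, h6, h7, h8, h9, h10, h11, h12, h13] at hl

  by_cases hc3 : cloud = "GCP"
  · subst hc3
    have hl : linG entity_index ≠ none := by simpa [lin, hc1, hc2] using hsome
    by_cases h0 : entity_index = 0
    · subst h0
      have hA : geLM 20 "GCP" 0 none = some [0] := by decide
      simp only [build_entity_lineage, build_entity_lineage_alt, get_matrix, hA]
      simp [List.idxOf?, List.findIdx?_cons, List.foldl]
    by_cases h1 : entity_index = 1
    · subst h1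
      have hA : geLM 20 "GCP" 1 none = some [0, 1] := by decide
      have hB : b_chain 20 (b_parents gcp_entity_matrix) 1 [] = some [1] := by decide
      simp only [build_entity_lineage, build_entity_lineage_alt, get_matrix, hA]
      simp [hB, List.idxOf?, List.findIdx?_cons, List.foldl]
      exact name_fix _
    by_cases h2 : entity_index = 2
    · subst h2
      have hA : geLM 20 "GCP" 2 none = some [0, 1, 2] := by decide
      have hB : b_chain 20 (b_parents gcp_entity_matrix) 2 [] = some [2, 1] := by decide
      simp only [build_entity_lineage, build_entity_lineage_alt, get_matrix, hA]
      simp [hB, List.idxOf?, List.findIdx?_cons, List.foldl]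
      repeat' apply And.intro
      all_goals exact name_fix _
    by_cases h3 : entity_index = 3
    · subst h3
      have hA : geLM 20 "GCP" 3 none = some [0, 1, 3] := by decide
      have hB : b_chain 20 (b_parents gcp_entity_matrix) 3 [] = some [3, 1] := by decide
      simp only [build_entity_lineage, build_entity_lineage_alt, get_matrix, hA]
      simp [hB, List.idxOf?, List.findIdx?_cons, List.foldl]
      repeat' apply And.intro
      all_goals exact name_fix _
    by_cases h4 : entity_index = 4
    · subst h4
      have hA : geLM 20 "GCP" 4 none = some [0, 1, 3, 4] := by decide
      have hB : b_chain 20 (b_parents gcp_entity_matrix) 4 [] = some [4, 3, 1] := by decide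
      simp only [build_entity_lineage, build_entity_lineage_alt, get_matrix, hA]
      simp [hB, List.idxOf?, List.findIdx?_cons, List.foldl]
      repeat' apply And.intro
      all_goals exact name_fix _
    by_cases h5 : entity_index = 5
    · subst h5
      have hA : geLM 20 "GCP" 5 none = some [0, 1, 3, 5] := by decide
      have hB : b_chain 20 (b_parents gcp_entity_matrix) 5 [] = some [5, 3, 1] := by decide
      simp only [build_entity_lineage, build_entity_lineage_alt, get_matrix, hA]
      simp [hB, List.idxOf?, List.findIdx?_cons, List.foldl]
      repeat' apply And.intro
      all_goals exact name_fix _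
    by_cases h6 : entity_index = 6
    · subst h6
      have hA : geLM 20 "GCP" 6 none = some [0, 1, 3, 5, 6] := by decide
      have hB : b_chain 20 (b_parents gcp_entity_matrix) 6 [] = some [6, 5, 3, 1] := by decide
      simp only [build_entity_lineage, build_entity_lineage_alt, get_matrix, hA]
      simp [hB, List.idxOf?, List.findIdx?_cons, List.foldl]
      repeat' apply And.intro
      all_goals exact name_fix _
    by_cases h7 : entity_index = 7
    · subst h7
      have hA : geLM 20 "GCP" 7 none = some [0, 1, 3, 5, 7] := by decide
      have hB : b_chain 20 (b_parents gcp_entity_matrix) 7 [] = some [7, 5, 3, 1] := by decide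
      simp only [build_entity_lineage, build_entity_lineage_alt, get_matrix, hA]
      simp [hB, List.idxOf?, List.findIdx?_cons, List.foldl]
      repeat' apply And.intro
      all_goals exact name_fix _
    by_cases h8 : entity_index = 8
    · subst h8
      have hA : geLM 20 "GCP" 8 none = some [0, 1, 3, 5, 7, 8] := by decide
      have hB : b_chain 20 (b_parents gcp_entity_matrix) 8 [] = some [8, 7, 5, 3, 1] := by decide
      simp only [build_entity_lineage, build_entity_lineage_alt, get_matrix, hA]
      simp [hB, List.idxOf?, List.findIdx?_cons, List.foldl]
      repeat' apply And.intro
      all_goals exact name_fix _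
    by_cases h9 : entity_index = 9
    · subst h9
      have hA : geLM 20 "GCP" 9 none = some [0, 9] := by decide
      have hB : b_chain 20 (b_parents gcp_entity_matrix) 9 [] = some [9] := by decide
      simp only [build_entity_lineage, build_entity_lineage_alt, get_matrix, hA]
      simp [hB, List.idxOf?, List.findIdx?_cons, List.foldl]
      exact name_fix _
    simp [linG, h0, h1, h2, h3, h4, h5, h6, h7, h8, h9] at hl

  -- unknown cloud: only entity_index = 0 is admitted, and both sides return [mg_friendly_name]
  have h0 : entity_index = 0 := by
    by_cases h : entity_index = 0
    · exact h
    · simp [lin, hc1, hc2, hc3, h] at hsome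
  subst h0
  simp only [build_entity_lineage, build_entity_lineage_alt, geLM_zero cloud]
  simp [List.idxOf?, List.findIdx?_cons, List.foldl]
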